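-- pv_equiv track=rewrite | github.com/Praharsh-Projects/Eagle_Eye_Carbon_v1 | src/qa/intent.py | _extract_days_of_week
-- ===== SOURCE A (Python) =====
-- from typing import Any, Dict, List, Optional
--
-- DOW_NAMES = [
--     "monday",
--     "tuesday",
--     "wednesday",
--     "thursday",
--     "friday",
--     "saturday",
--     "sunday",
-- ]
--
-- DOW_TITLE = {name: name.title() for name in DOW_NAMES}
--
-- def _extract_days_of_week(question: str) -> List[str]:
--     q = question.lower()
--     hits: List[tuple[int, str]] = []
--     for day in DOW_NAMES:
--         idx = q.find(day)
--         if idx >= 0: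
--             hits.append((idx, DOW_TITLE[day]))
--     hits.sort(key=lambda x: x[0])
--     return [name for _, name in hits]
-- ===== SOURCE B (Python) =====
-- DOW = [
--     ("monday", "Monday"),
--     ("tuesday", "Tuesday"),
--     ("wednesday", "Wednesday"),
--     ("thursday", "Thursday"),
--     ("friday", "Friday"),
--     ("saturday", "Saturday"),
--     ("sunday", "Sunday"),
-- ]
--
--
-- def _extract_days_of_week(question):
--     q = question.lower()
--     seen = set()
--     out = []
--     for i in range(len(q)):
--         for day, title in DOW:
--             if day not in seen and q.startswith(day, i):
--                 seen.add(day)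
--                 out.append(title)
--     return out
-- ===== Notes on version B (the rewrite author's own statement) =====
-- stated objective: alternative
-- what changed: B replaces A's seven independent str.find scans followed by a sort-by-index with a single left-to-right scan of the lowered string that, at each position, emits the first match of any not-yet-seen day name, so matches arrive already in first-occurrence order and no sort is needed.
import Mathlib
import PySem

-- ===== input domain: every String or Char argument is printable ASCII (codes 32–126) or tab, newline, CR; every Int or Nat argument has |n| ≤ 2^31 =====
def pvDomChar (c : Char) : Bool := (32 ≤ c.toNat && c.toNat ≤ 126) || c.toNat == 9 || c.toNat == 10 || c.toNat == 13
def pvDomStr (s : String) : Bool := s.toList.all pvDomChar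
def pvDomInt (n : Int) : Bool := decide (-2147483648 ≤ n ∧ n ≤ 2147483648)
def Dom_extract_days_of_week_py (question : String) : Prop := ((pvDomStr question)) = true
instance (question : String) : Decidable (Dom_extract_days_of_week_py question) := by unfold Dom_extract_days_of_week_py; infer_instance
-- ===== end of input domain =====

-- B replaces A's seven independent find-then-sort passes by ONE left-to-right scan that emits
-- each day name at its first occurrence, so the output needs no sort (objective: alternative).

-- ===== PORT A =====
def pvDOW_NAMES : List String :=
  ["monday", "tuesday", "wednesday", "thursday", "friday", "saturday", "sunday"]

-- str.title() ported by hand (PySem has no title): uppercase the first character.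
-- Exact for the inputs it receives here: single all-lowercase alphabetic words.
def pvTitle (s : String) : String :=
  match s.toList with
  | [] => ""
  | c :: cs => String.ofList (PySem.Chars.upperChar c :: cs)

-- DOW_TITLE = {name: name.title() for name in DOW_NAMES}
def pvDOW_TITLE : PySem.Dict String String :=
  pvDOW_NAMES.foldl (fun d name => d.insert name (pvTitle name)) PySem.Dict.empty

def extract_days_of_week_py (question : String) : List String :=
  let q := PySem.Str.lower question
  let hits : List (Int × String) :=
    pvDOW_NAMES.foldl (fun hits day =>
      let idx := PySem.Str.find q day
      if 0 ≤ idx then hits ++ [(idx, (pvDOW_TITLE.get? day).getD "")] else hits) []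
  (PySem.List.sorted hits (fun x => x.1) false).map (fun x => x.2)

-- ===== PORT B =====
def pvDOW : List (String × String) :=
  [("monday", "Monday"), ("tuesday", "Tuesday"), ("wednesday", "Wednesday"),
   ("thursday", "Thursday"), ("friday", "Friday"), ("saturday", "Saturday"),
   ("sunday", "Sunday")]

-- q.startswith(day, i) for 0 ≤ i ≤ len(q) is ported as startswith on (drop i): exact there.
def extract_days_of_week_py_alt (question : String) : List String :=
  let q := (PySem.Str.lower question).toList
  let final :=
    (List.range q.length).foldl (fun st i =>
      pvDOW.foldl (fun st p =>
        if !(PySem.Set.contains st.1 p.1) && PySem.Chars.startswith (q.drop i) p.1.toList then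
          (PySem.Set.add st.1 p.1, st.2 ++ [p.2])
        else st) st)
      (PySem.Set.empty, ([] : List String))
  final.2

-- ===== PRECONDITION & SPEC =====
def Spec_extract_days_of_week_py (question : String) (out : List String) : Prop := out = extract_days_of_week_py_alt question
instance (question : String) (out : List String) : Decidable (Spec_extract_days_of_week_py question out) := by unfold Spec_extract_days_of_week_py; infer_instance

-- ===== CLAIM (what is proved, stated in full; the proofs are below) =====
def Claim_equal_extract_days_of_week_py : Prop := ∀ (question : String), Dom_extract_days_of_week_py question → Spec_extract_days_of_week_py question (extract_days_of_week_py question)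

-- ===== LEMMAS AND PROOFS =====

-- The pairs A's loop collects, seen through pvDOW: (first index, Title) per day that occurs.
def pvPs (L : List Char) : List (Int × String) :=
  (pvDOW.filter (fun p => decide (0 ≤ PySem.Chars.find L p.1.toList))).map
    (fun p => (PySem.Chars.find L p.1.toList, p.2))

-- The scan output: for each position i in order, the titles of days whose FIRST occurrence is i.
def pvRes (L : List Char) (n : Nat) : List String :=
  (List.range n).flatMap (fun (i : Nat) =>
    (pvDOW.filter (fun p => decide (PySem.Chars.find L p.1.toList = (i : Int)))).map Prod.snd)

-- basic facts about the literal day list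
theorem pvDOW_nodup : (pvDOW.map Prod.fst).Nodup := by decide

theorem pvDOW_ne_nil : ∀ p ∈ pvDOW, p.1.toList ≠ [] := by decide

theorem pvDOW_no_prefix : pvDOW.Pairwise
    (fun p q => ¬ p.1.toList <+: q.1.toList ∧ ¬ q.1.toList <+: p.1.toList) := by decide

-- occurrence implies the character list is long enough (used for key bounds)
theorem find_lt_length (L d : List Char) (hd : d ≠ []) (h0 : 0 ≤ PySem.Chars.find L d) :
    (PySem.Chars.find L d).toNat < L.length := by
  have hs := (PySem.Chars.find_spec h0).1
  rcases hs with ⟨t, ht⟩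
  have : d.length + t.length = L.length - (PySem.Chars.find L d).toNat := by
    have := congrArg List.length ht
    simpa [List.length_drop] using this
  have hdl : 0 < d.length := List.length_pos_iff.mpr hd
  have hle : (PySem.Chars.find L d).toNat ≤ L.length := by
    have := PySem.Chars.find_le_length (s := L) (sub := d)
    omega
  omega

-- distinct days never have the same first index (no day is a prefix of another)
theorem pvPs_keys_pairwise (L : List Char) :
    (pvPs L).Pairwise (fun a b => a.1 ≠ b.1) := by
  unfold pvPs
  rw [List.pairwise_map]
  have h1 := pvDOW_no_prefix.filter (fun p => decide (0 ≤ PySem.Chars.find L p.1.toList))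
  refine h1.imp_of_mem ?_
  intro a b ha hb hnp heq
  simp only at heq
  have ha0 : 0 ≤ PySem.Chars.find L a.1.toList := by
    have := (List.mem_filter.mp ha).2; simpa using this
  have hb0 : 0 ≤ PySem.Chars.find L b.1.toList := by
    have := (List.mem_filter.mp hb).2; simpa using this
  have hsa := (PySem.Chars.find_spec ha0).1
  have hsb := (PySem.Chars.find_spec hb0).1
  rw [heq] at hsa
  rcases List.prefix_or_prefix_of_prefix hsa hsb with h | h
  · exact hnp.1 h
  · exact hnp.2 h

-- evaluated title lookups for the seven literal day names
theorem title_monday : (pvDOW_TITLE.get? "monday").getD "" = "Monday" := by decide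
theorem title_tuesday : (pvDOW_TITLE.get? "tuesday").getD "" = "Tuesday" := by decide
theorem title_wednesday : (pvDOW_TITLE.get? "wednesday").getD "" = "Wednesday" := by decide
theorem title_thursday : (pvDOW_TITLE.get? "thursday").getD "" = "Thursday" := by decide
theorem title_friday : (pvDOW_TITLE.get? "friday").getD "" = "Friday" := by decide
theorem title_saturday : (pvDOW_TITLE.get? "saturday").getD "" = "Saturday" := by decide
theorem title_sunday : (pvDOW_TITLE.get? "sunday").getD "" = "Sunday" := by decide

-- A's program equals map snd of sorted pvPs
set_option maxHeartbeats 1000000 in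
theorem A_eq_sorted (question : String) :
    extract_days_of_week_py question =
      (PySem.List.sorted (pvPs ((PySem.Str.lower question).toList)) (fun x => x.1) false).map
        (fun x => x.2) := by
  simp only [extract_days_of_week_py, pvPs, pvDOW_NAMES, pvDOW,
    List.foldl_cons, List.foldl_nil, List.filter_cons, List.filter_nil,
    PySem.Str.find_eq, title_monday, title_tuesday, title_wednesday, title_thursday,
    title_friday, title_saturday, title_sunday, decide_eq_true_eq]
  congr 1
  congr 1
  split_ifs <;> rfl

-- the pairs of pvPs listed position by position
def pvC (L : List Char) (n : Nat) : List (Int × String) :=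
  (List.range n).flatMap (fun (i : Nat) => (pvPs L).filter (fun x => decide (x.1 = (i : Int))))

theorem mem_pvPs (L : List Char) (a : Int × String) :
    a ∈ pvPs L ↔ ∃ p ∈ pvDOW, 0 ≤ PySem.Chars.find L p.1.toList ∧
      a = (PySem.Chars.find L p.1.toList, p.2) := by
  simp only [pvPs, List.mem_map, List.mem_filter, decide_eq_true_eq]
  constructor
  · rintro ⟨p, ⟨hp, h0⟩, rfl⟩; exact ⟨p, hp, h0, rfl⟩
  · rintro ⟨p, hp, h0, rfl⟩; exact ⟨p, ⟨hp, h0⟩, rfl⟩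

theorem pvPs_key_bounds (L : List Char) (a : Int × String) (ha : a ∈ pvPs L) :
    0 ≤ a.1 ∧ a.1 < (L.length : Int) := by
  rcases (mem_pvPs L a).mp ha with ⟨p, hp, h0, rfl⟩
  have hne := pvDOW_ne_nil p hp
  have := find_lt_length L p.1.toList hne h0
  constructor
  · exact h0
  · simp only
    omega

theorem mem_pvC (L : List Char) (n : Nat) (a : Int × String) :
    a ∈ pvC L n ↔ (∃ i < n, a.1 = (i : Int)) ∧ a ∈ pvPs L := by
  simp only [pvC, List.mem_flatMap, List.mem_range, List.mem_filter, decide_eq_true_eq]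
  constructor
  · rintro ⟨i, hi, ha, hk⟩; exact ⟨⟨i, hi, hk⟩, ha⟩
  · rintro ⟨⟨i, hi, hk⟩, ha⟩; exact ⟨i, hi, ha, hk⟩

theorem pvC_pairwise_lt (L : List Char) (n : Nat) :
    (pvC L n).Pairwise (fun a b => a.1 < b.1) := by
  induction n with
  | zero => simp [pvC]
  | succ n ih =>
    unfold pvC
    rw [List.range_succ, List.flatMap_append]
    rw [List.pairwise_append]
    refine ⟨ih, ?_, ?_⟩
    · simp only [List.flatMap_cons, List.flatMap_nil, List.append_nil]
      have h1 := (pvPs_keys_pairwise L).filter (fun x => decide (x.1 = (n : Int)))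
      refine h1.imp_of_mem ?_
      intro a b ha hb hne
      have ha' : a.1 = (n : Int) := by simpa using (List.mem_filter.mp ha).2
      have hb' : b.1 = (n : Int) := by simpa using (List.mem_filter.mp hb).2
      exact absurd (ha'.trans hb'.symm) hne
    · intro a ha b hb
      rcases (mem_pvC L n a).mp ha with ⟨⟨i, hi, hk⟩, _⟩
      simp only [List.flatMap_cons, List.flatMap_nil, List.append_nil, List.mem_filter,
        decide_eq_true_eq] at hb
      rw [hk, hb.2]
      exact_mod_cast hi

theorem pvPs_nodup (L : List Char) : (pvPs L).Nodup :=
  (pvPs_keys_pairwise L).imp (fun h heq => h (congrArg Prod.fst heq))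

theorem pvC_perm (L : List Char) : (pvC L L.length).Perm (pvPs L) := by
  rw [List.perm_ext_iff_of_nodup
    ((pvC_pairwise_lt L L.length).imp (fun h heq => by rw [heq] at h; omega))
    (pvPs_nodup L)]
  intro a
  rw [mem_pvC]
  constructor
  · exact fun h => h.2
  · intro ha
    refine ⟨?_, ha⟩
    have hb := pvPs_key_bounds L a ha
    exact ⟨a.1.toNat, by omega, by omega⟩

-- per-position bucket: pvPs pairs with key i, projected to titles, = days whose first index is i
theorem bucket_snd (L : List Char) (i : Nat) :
    ((pvPs L).filter (fun x => decide (x.1 = (i : Int)))).map Prod.snd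
      = (pvDOW.filter (fun p => decide (PySem.Chars.find L p.1.toList = (i : Int)))).map
          Prod.snd := by
  unfold pvPs
  rw [List.filter_map, List.map_map, List.filter_filter]
  refine congrArg (List.map _) (List.filter_congr ?_)
  intro p _
  simp only [Function.comp_apply]
  by_cases h : PySem.Chars.find L p.1.toList = (i : Int)
  · simp [h]
  · simp [h]

theorem sorted_eq_pvRes (L : List Char) :
    ((PySem.List.sorted (pvPs L) (fun x => x.1) false).map (fun x => x.2)) = pvRes L L.length := by
  rw [PySem.List.sorted_eq_of_perm_of_pairwise_lt (pvPs L) (pvC L L.length) (fun x => x.1)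
    (pvC_perm L) (pvC_pairwise_lt L L.length)]
  unfold pvC pvRes
  rw [List.map_flatMap]
  refine congrArg (fun f => List.flatMap f (List.range L.length)) (funext fun i => ?_)
  simpa using bucket_snd L i

-- the scan's per-position condition is "first occurrence is exactly here"
theorem cond_iff (L d : List Char) (i : Nat) (hseen : Bool)
    (hs : hseen = true ↔ (0 ≤ PySem.Chars.find L d ∧ PySem.Chars.find L d < (i : Int))) :
    ((!hseen) && PySem.Chars.startswith (L.drop i) d) = true ↔
      PySem.Chars.find L d = (i : Int) := by
  rw [Bool.and_eq_true, Bool.not_eq_eq_eq_not, Bool.not_true, PySem.Chars.startswith_iff]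
  constructor
  · rintro ⟨hns, hocc⟩
    have hnseen : ¬ (0 ≤ PySem.Chars.find L d ∧ PySem.Chars.find L d < (i : Int)) := by
      rw [← hs]; simp [hns]
    have h0 : 0 ≤ PySem.Chars.find L d := by
      rw [PySem.Chars.find_nonneg_iff, ← PySem.Chars.isIn_iff_infix]
      exact (PySem.Chars.exists_prefix_drop_iff_isIn d L).mp ⟨i, hocc⟩
    have hsp := PySem.Chars.find_spec h0
    have hle : (PySem.Chars.find L d).toNat ≤ i := by
      by_contra hlt
      exact hsp.2 i (by omega) hocc
    omega
  · intro hfi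
    have h0 : 0 ≤ PySem.Chars.find L d := by rw [hfi]; exact Int.natCast_nonneg i
    have hsp := PySem.Chars.find_spec h0
    have ht : (PySem.Chars.find L d).toNat = i := by omega
    rw [ht] at hsp
    refine ⟨?_, hsp.1⟩
    rw [← Bool.not_eq_true, hs]
    omega

-- one pass of the inner loop over the day table at position i
theorem inner_fold (L : List Char) (i : Nat) :
    ∀ (dows : List (String × String)) (seen : PySem.Set String) (res : List String),
      (dows.map Prod.fst).Nodup →
      (∀ p ∈ dows, (PySem.Set.contains seen p.1 = true ↔
        (0 ≤ PySem.Chars.find L p.1.toList ∧ PySem.Chars.find L p.1.toList < (i : Int)))) →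
      ∃ seen',
        dows.foldl (fun st p =>
            if !(PySem.Set.contains st.1 p.1) && PySem.Chars.startswith (L.drop i) p.1.toList then
              (PySem.Set.add st.1 p.1, st.2 ++ [p.2])
            else st) (seen, res)
          = (seen', res ++ (dows.filter
              (fun p => decide (PySem.Chars.find L p.1.toList = (i : Int)))).map Prod.snd)
        ∧ ∀ x, PySem.Set.contains seen' x = true ↔
            (PySem.Set.contains seen x = true ∨
              ∃ p ∈ dows, x = p.1 ∧ PySem.Chars.find L p.1.toList = (i : Int)) := by
  intro dows
  induction dows with
  | nil => intro seen res _ _; exact ⟨seen, by simp, by simp⟩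
  | cons p t ih =>
    intro seen res hnd hseen
    have hnd' : (t.map Prod.fst).Nodup := by simpa using hnd.of_cons
    have hpseen := hseen p (by simp)
    have hcond := cond_iff L p.1.toList i (PySem.Set.contains seen p.1) hpseen
    rw [List.foldl_cons]
    by_cases hfi : PySem.Chars.find L p.1.toList = (i : Int)
    · rw [if_pos (hcond.mpr hfi)]
      have hpt : p.1 ∉ t.map Prod.fst := by simpa using (List.nodup_cons.mp hnd).1
      have hseen' : ∀ q ∈ t, (PySem.Set.contains (PySem.Set.add seen p.1) q.1 = true ↔
          (0 ≤ PySem.Chars.find L q.1.toList ∧ PySem.Chars.find L q.1.toList < (i : Int))) := by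
        intro q hq
        have hne : q.1 ≠ p.1 := by
          intro h
          exact hpt (h ▸ List.mem_map_of_mem hq)
        rw [PySem.Set.contains_iff, PySem.Set.mem_add]
        rw [← hseen q (by simp [hq]), PySem.Set.contains_iff]
        simp [hne]
      rcases ih (PySem.Set.add seen p.1) (res ++ [p.2]) hnd' hseen' with ⟨seen', heq, hmem⟩
      refine ⟨seen', ?_, ?_⟩
      · rw [heq, List.filter_cons, if_pos (by simpa using hfi)]
        simp
      · intro x
        rw [hmem x, PySem.Set.contains_iff, PySem.Set.mem_add, ← PySem.Set.contains_iff (s := seen)]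
        constructor
        · rintro (⟨h | rfl⟩ | ⟨q, hq, rfl, hfq⟩)
          · exact Or.inl h
          · exact Or.inr ⟨p, by simp, rfl, hfi⟩
          · exact Or.inr ⟨q, by simp [hq], rfl, hfq⟩
        · rintro (h | ⟨q, hq, rfl, hfq⟩)
          · exact Or.inl (Or.inl h)
          · rcases List.mem_cons.mp hq with rfl | hq'
            · exact Or.inl (Or.inr rfl)
            · exact Or.inr ⟨q, hq', rfl, hfq⟩
    · rw [if_neg (fun h => hfi (hcond.mp h))]
      rcases ih seen res hnd' (fun q hq => hseen q (by simp [hq])) with ⟨seen', heq, hmem⟩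
      refine ⟨seen', ?_, ?_⟩
      · rw [heq, List.filter_cons, if_neg (by simpa using hfi)]
      · intro x
        rw [hmem x]
        constructor
        · rintro (h | ⟨q, hq, rfl, hfq⟩)
          · exact Or.inl h
          · exact Or.inr ⟨q, by simp [hq], rfl, hfq⟩
        · rintro (h | ⟨q, hq, rfl, hfq⟩)
          · exact Or.inl h
          · rcases List.mem_cons.mp hq with rfl | hq'
            · exact absurd hfq hfi
            · exact Or.inr ⟨q, hq', rfl, hfq⟩

-- the whole scan, positions 0..n-1
theorem outer_fold (L : List Char) (n : Nat) :
    ∃ seen,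
      (List.range n).foldl (fun st i =>
          pvDOW.foldl (fun st p =>
            if !(PySem.Set.contains st.1 p.1) && PySem.Chars.startswith (L.drop i) p.1.toList then
              (PySem.Set.add st.1 p.1, st.2 ++ [p.2])
            else st) st) (PySem.Set.empty, ([] : List String))
        = (seen, pvRes L n)
      ∧ ∀ x, PySem.Set.contains seen x = true ↔
          ∃ p ∈ pvDOW, x = p.1 ∧ 0 ≤ PySem.Chars.find L p.1.toList ∧
            PySem.Chars.find L p.1.toList < (n : Int) := by
  induction n with
  | zero =>
    refine ⟨PySem.Set.empty, by simp [pvRes], ?_⟩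
    intro x
    simp only [PySem.Set.contains_iff]
    constructor
    · intro h; exact absurd h (List.not_mem_nil)
    · rintro ⟨p, _, _, _, hlt⟩; omega
  | succ n ih =>
    rcases ih with ⟨seen, heq, hmem⟩
    rw [List.range_succ, List.foldl_append, heq, List.foldl_cons, List.foldl_nil]
    have hseen : ∀ p ∈ pvDOW, (PySem.Set.contains seen p.1 = true ↔
        (0 ≤ PySem.Chars.find L p.1.toList ∧ PySem.Chars.find L p.1.toList < (n : Int))) := by
      intro p hp
      rw [hmem p.1]
      constructor
      · rintro ⟨q, _, hq, h⟩; rw [hq]; exact h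
      · intro h; exact ⟨p, hp, rfl, h⟩
    rcases inner_fold L n pvDOW seen (pvRes L n) pvDOW_nodup hseen with ⟨seen', heq', hmem'⟩
    refine ⟨seen', ?_, ?_⟩
    · rw [heq']
      unfold pvRes
      rw [List.range_succ, List.flatMap_append, List.flatMap_cons, List.flatMap_nil,
        List.append_nil]
    · intro x
      rw [hmem' x, hmem x]
      constructor
      · rintro (⟨p, hp, rfl, h0, hlt⟩ | ⟨p, hp, rfl, hfi⟩)
        · exact ⟨p, hp, rfl, h0, by omega⟩
        · exact ⟨p, hp, rfl, by rw [hfi]; exact Int.natCast_nonneg n, by omega⟩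
      · rintro ⟨p, hp, rfl, h0, hlt⟩
        by_cases hfi : PySem.Chars.find L p.1.toList = (n : Int)
        · exact Or.inr ⟨p, hp, rfl, hfi⟩
        · exact Or.inl ⟨p, hp, rfl, h0, by omega⟩

-- B's program computes pvRes
theorem B_eq_pvRes (question : String) :
    extract_days_of_week_py_alt question =
      pvRes ((PySem.Str.lower question).toList) ((PySem.Str.lower question).toList).length := by
  unfold extract_days_of_week_py_alt
  rcases outer_fold ((PySem.Str.lower question).toList)
    ((PySem.Str.lower question).toList).length with ⟨seen, heq, _⟩
  simp only [heq]

-- ===== VERDICT (by name: the statement is the Claim_ definition above) =====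
theorem extract_days_of_week_py_spec : Claim_equal_extract_days_of_week_py := by
  intro question _
  unfold Spec_extract_days_of_week_py
  rw [A_eq_sorted, sorted_eq_pvRes, B_eq_pvRes]
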